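-- pv_equiv track=rewrite | github.com/AlejandroGilGonzalez/freecodecamp | daily_challenges/august_2025/jbelmud_text.py | jbelmu
-- ===== SOURCE A (Python) =====
-- def jbelmu(text:str) -> str:
--
--     text = text.split(" ")
--
--
--     new_text = []
--
--     for word in text:
--         if len(word) > 1:
--             sorted_w = sorted(word[1:-1])
--             word = word[0] + "".join(sorted_w) + word[-1]
--             new_text.append(word)
--         else:
--             new_text.append(word)
--
--     return (" ".join(new_text))
-- ===== SOURCE B (Python) =====
-- def _mid(w):
--     if len(w) < 2:
--         return w
--     return w[0] + ''.join(sorted(w[1:-1])) + w[-1]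
--
-- def jbelmu(text: str) -> str:
--     res = []
--     cur = []
--     for c in text:
--         if c == ' ':
--             res.append(_mid(''.join(cur)))
--             res.append(' ')
--             cur = []
--         else:
--             cur.append(c)
--     res.append(_mid(''.join(cur)))
--     return ''.join(res)
-- ===== Notes on version B (the rewrite author's own statement) =====
-- stated objective: alternative
-- what changed: A splits the text into a word list, rewrites each word in a loop and rejoins on spaces; B does one left-to-right character scan that accumulates the current word and emits mangled words and separators as it goes, never building the split word list.
import Mathlib
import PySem

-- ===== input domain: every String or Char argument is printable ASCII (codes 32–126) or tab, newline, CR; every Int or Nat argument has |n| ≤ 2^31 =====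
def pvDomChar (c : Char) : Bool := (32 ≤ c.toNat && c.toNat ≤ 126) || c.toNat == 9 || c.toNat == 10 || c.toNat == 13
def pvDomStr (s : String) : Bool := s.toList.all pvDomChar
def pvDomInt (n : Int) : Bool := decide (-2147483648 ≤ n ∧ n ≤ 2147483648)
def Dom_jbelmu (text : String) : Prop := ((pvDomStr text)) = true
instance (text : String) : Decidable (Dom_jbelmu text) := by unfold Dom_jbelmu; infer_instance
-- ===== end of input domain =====

-- B replaces A's split-on-space / per-word loop / join pipeline by a single left-to-right
-- character scan that emits mangled words and separators as it goes (objective: alternative).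

-- ===== PORT A =====
-- A: words = text.split(" "); loop appending transformed words; " ".join(new_text)
def jbelmuA (text : List Char) : List Char :=
  let words := PySem.Chars.splitOn text [' ']
  let newText := words.foldl (fun (acc : List (List Char)) word =>
    if word.length > 1 then
      let sorted_w := PySem.List.sorted (PySem.List.slice word (some 1) (some (-1))) (fun c => c) false
      let word' := [PySem.List.pyGetD word 0 ' '] ++ sorted_w ++ [PySem.List.pyGetD word (-1) ' ']
      acc ++ [word']
    else acc ++ [word]) ([] : List (List Char))
  PySem.Chars.join [' '] newText

def jbelmu (text : String) : String := String.ofList (jbelmuA text.toList)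

-- ===== PORT B =====
-- Source B's _mid: w unchanged if len(w) < 2, else w[0] + ''.join(sorted(w[1:-1])) + w[-1]
def midB (w : List Char) : List Char :=
  if w.length < 2 then w
  else [PySem.List.pyGetD w 0 ' ']
       ++ PySem.List.sorted (PySem.List.slice w (some 1) (some (-1))) (fun c => c) false
       ++ [PySem.List.pyGetD w (-1) ' ']

-- Source B's loop: for c in text, state (res, cur); then res.append(_mid(cur)); ''.join(res)
def jbelmuB (text : List Char) : List Char :=
  let st := text.foldl (fun (st : List (List Char) × List Char) c =>
    if c = ' ' then (st.1 ++ [midB st.2, [' ']], [])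
    else (st.1, st.2 ++ [c])) (([] : List (List Char)), ([] : List Char))
  PySem.Chars.join [] (st.1 ++ [midB st.2])

def jbelmu_alt (text : String) : String := String.ofList (jbelmuB text.toList)

-- ===== PRECONDITION & SPEC =====
def Spec_jbelmu (text : String) (out : String) : Prop := out = jbelmu_alt text
instance (text : String) (out : String) : Decidable (Spec_jbelmu text out) := by unfold Spec_jbelmu; infer_instance

-- ===== CLAIM (what is proved, stated in full; the proofs are below) =====
def Claim_equal_jbelmu : Prop := ∀ (text : String), Dom_jbelmu text → Spec_jbelmu text (jbelmu text)

-- ===== LEMMAS AND PROOFS =====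

-- the space-separated word decomposition, as a structural recursion
def sp : List Char → List (List Char)
  | [] => [[]]
  | c :: rest => if c = ' ' then [] :: sp rest else (sp rest).modifyHead (c :: ·)

theorem sp_ne_nil (l : List Char) : sp l ≠ [] := by
  cases l with
  | nil => simp [sp]
  | cons c rest =>
    simp only [sp]
    split
    · simp
    · cases h : sp rest with
      | nil => exact absurd h (sp_ne_nil rest)
      | cons a t => simp [List.modifyHead]

theorem go_eq : ∀ (fuel : Nat) (l cur : List Char) (acc : List (List Char)),
    l.length < fuel →
    PySem.Chars.splitOn.go [' '] fuel l cur acc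
      = acc.reverse ++ (sp l).modifyHead (cur.reverse ++ ·) := by
  intro fuel
  induction fuel with
  | zero => intro l cur acc h; omega
  | succ n ih =>
    intro l cur acc h
    cases l with
    | nil => simp [PySem.Chars.splitOn.go, sp]
    | cons c rest =>
      by_cases hc : c = ' '
      · subst hc
        have hpre : List.isPrefixOf [' '] (' ' :: rest) = true := by simp [List.isPrefixOf]
        rw [PySem.Chars.splitOn.go, if_pos hpre]
        simp only [List.length, List.drop_succ_cons, List.drop_zero] at *
        rw [ih rest [] (cur.reverse :: acc) (by omega)]
        simp [sp]
        exact congrFun List.modifyHead_id (sp rest)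
      · have hpre : List.isPrefixOf [' '] (c :: rest) = false := by
          simp [List.isPrefixOf]; exact fun h => absurd h.symm hc
        rw [PySem.Chars.splitOn.go, if_neg (by simp [hpre])]
        rw [ih rest (c :: cur) acc (by simpa using Nat.lt_of_succ_lt_succ h)]
        simp only [sp, if_neg hc, List.modifyHead_modifyHead]
        congr 1
        cases h2 : sp rest with
        | nil => exact absurd h2 (sp_ne_nil rest)
        | cons a t => simp [List.modifyHead, Function.comp]

theorem splitOn_eq_sp (l : List Char) : PySem.Chars.splitOn l [' '] = sp l := by
  rw [PySem.Chars.splitOn, go_eq (l.length + 1) l [] [] (by omega)]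
  cases h : sp l with
  | nil => exact absurd h (sp_ne_nil l)
  | cons a t => simp [List.modifyHead]

theorem join_empty_sep (parts : List (List Char)) :
    PySem.Chars.join [] parts = parts.flatten := by
  induction parts with
  | nil => simp [PySem.Chars.join, List.intercalate]
  | cons a t ih =>
    cases t with
    | nil => simp [PySem.Chars.join, List.intercalate]
    | cons b t' =>
      rw [PySem.Chars.join_cons_cons, ih]
      simp

-- A's per-word transform, as a function
def midA (word : List Char) : List Char :=
  if word.length > 1 then
    [PySem.List.pyGetD word 0 ' ']
    ++ PySem.List.sorted (PySem.List.slice word (some 1) (some (-1))) (fun c => c) false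
    ++ [PySem.List.pyGetD word (-1) ' ']
  else word

theorem midB_eq_midA : midB = midA := by
  funext w
  unfold midB midA
  by_cases h : w.length < 2
  · rw [if_pos h, if_neg (by omega)]
  · rw [if_neg h, if_pos (by omega)]

theorem jbelmuA_eq (l : List Char) :
    jbelmuA l = PySem.Chars.join [' '] ((sp l).map midA) := by
  unfold jbelmuA
  rw [splitOn_eq_sp]
  have hfun : (fun (acc : List (List Char)) word =>
      if word.length > 1 then
        let sorted_w := PySem.List.sorted (PySem.List.slice word (some 1) (some (-1))) (fun c => c) false
        let word' := [PySem.List.pyGetD word 0 ' '] ++ sorted_w ++ [PySem.List.pyGetD word (-1) ' ']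
        acc ++ [word']
      else acc ++ [word]) = fun acc word => acc ++ [midA word] := by
    funext acc word
    unfold midA
    split <;> simp
  rw [hfun]
  show PySem.Chars.join [' '] (List.foldl (fun acc word => acc ++ [midA word]) [] (sp l))
      = PySem.Chars.join [' '] (List.map midA (sp l))
  rw [PySem.List.foldl_append_singleton_eq_map midA (sp l) []]
  rfl

-- the loop invariant of B's scan
theorem loopB : ∀ (l : List Char) (res : List (List Char)) (cur : List Char),
    (((l.foldl (fun (st : List (List Char) × List Char) c =>
        if c = ' ' then (st.1 ++ [midB st.2, [' ']], [])
        else (st.1, st.2 ++ [c])) (res, cur)).1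
      ++ [midB (l.foldl (fun (st : List (List Char) × List Char) c =>
        if c = ' ' then (st.1 ++ [midB st.2, [' ']], [])
        else (st.1, st.2 ++ [c])) (res, cur)).2]).flatten)
    = res.flatten ++ PySem.Chars.join [' '] (((sp l).modifyHead (cur ++ ·)).map midB) := by
  intro l
  induction l with
  | nil =>
    intro res cur
    simp [sp, List.modifyHead, PySem.Chars.join_singleton]
  | cons c rest ih =>
    intro res cur
    by_cases hc : c = ' '
    · subst hc
      simp only [List.foldl_cons, reduceIte]
      rw [ih (res ++ [midB cur, [' ']]) []]
      cases h2 : sp rest with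
      | nil => exact absurd h2 (sp_ne_nil rest)
      | cons a t =>
        simp only [sp, reduceIte, h2, List.modifyHead, List.map_cons, List.nil_append]
        rw [PySem.Chars.join_cons_cons]
        simp
    · simp only [List.foldl_cons, if_neg hc]
      rw [ih res (cur ++ [c])]
      simp only [sp, if_neg hc, List.modifyHead_modifyHead]
      have : ((cur ++ [c]) ++ ·) = ((cur ++ ·) ∘ (c :: ·)) := by
        funext x; simp
      rw [this]

theorem jbelmuB_eq (l : List Char) :
    jbelmuB l = PySem.Chars.join [' '] ((sp l).map midB) := by
  unfold jbelmuB
  rw [join_empty_sep]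
  have := loopB l [] []
  simp only [List.flatten_nil, List.nil_append] at this
  rw [this]
  congr 1
  cases h2 : sp l with
  | nil => exact absurd h2 (sp_ne_nil l)
  | cons a t => simp [List.modifyHead]

theorem portsAgree (l : List Char) : jbelmuA l = jbelmuB l := by
  rw [jbelmuA_eq, jbelmuB_eq, midB_eq_midA]

-- ===== VERDICT (by name: the statement is the Claim_ definition above) =====
theorem jbelmu_spec : Claim_equal_jbelmu := by
  intro text _
  unfold Spec_jbelmu jbelmu jbelmu_alt
  rw [portsAgree]
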